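-- pv_equiv track=rewrite | github.com/TreyWW/MyFinances | backend/service/invoices/handler.py | validate_page
-- ===== SOURCE A (Python) =====
-- PAGES = ["single", "recurring"]
--
-- SUB_PAGES = ["single/create"]
--
-- def validate_page(page: str, sub_page: str) -> bool:
--     if not page:
--         return True
--
--     if sub_page:
--         for sub_page_looped in SUB_PAGES:
--             sub_page_page = sub_page_looped.split("/")[0]
--             if page == sub_page_page and sub_page == sub_page_looped.split("/")[1]:
--                 return True
--     else:
--         if page in PAGES:
--             return True
--     return False
-- ===== SOURCE B (Python) =====
-- PAGES = ["single", "recurring"]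
--
-- SUB_PAGES = ["single/create"]
--
--
-- def _build_index():
--     # page -> set of allowed sub_pages ("" stands for "no sub_page")
--     index = {}
--     for p in PAGES:
--         index[p] = index.get(p, set()) | {""}
--     for entry in SUB_PAGES:
--         p, s = entry.split("/")
--         index[p] = index.get(p, set()) | {s}
--     return index
--
--
-- _INDEX = _build_index()
--
--
-- def validate_page(page: str, sub_page: str) -> bool:
--     if not page:
--         return True
--     return sub_page in _INDEX.get(page, set())
-- ===== Notes on version B (the rewrite author's own statement) =====
-- stated objective: alternative
-- what changed: B precomputes once, from PAGES and SUB_PAGES, a dictionary mapping each page to the set of sub_pages allowed for it (with '' standing for no sub_page), so each call is a single index lookup plus set membership instead of A's per-call loop over SUB_PAGES with string splitting and the separate PAGES branch.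
import Mathlib
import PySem

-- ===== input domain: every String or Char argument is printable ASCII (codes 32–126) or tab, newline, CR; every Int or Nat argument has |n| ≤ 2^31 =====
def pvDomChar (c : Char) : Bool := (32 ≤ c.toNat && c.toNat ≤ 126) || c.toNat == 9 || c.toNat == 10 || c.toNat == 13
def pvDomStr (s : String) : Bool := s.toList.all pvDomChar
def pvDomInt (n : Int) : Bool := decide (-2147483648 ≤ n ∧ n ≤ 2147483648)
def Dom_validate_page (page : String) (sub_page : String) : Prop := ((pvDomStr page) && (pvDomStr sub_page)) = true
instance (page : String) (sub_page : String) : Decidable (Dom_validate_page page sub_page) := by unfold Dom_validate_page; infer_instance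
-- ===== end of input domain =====

-- B replaces A's per-call loop over SUB_PAGES (splitting each entry) and separate PAGES
-- branch by a page -> allowed-sub_pages index built once from both constants, so each
-- call is one dictionary lookup plus a set-membership test (objective: alternative).

def PAGES : List String := ["single", "recurring"]

def SUB_PAGES : List String := ["single/create"]

-- ===== PORT A =====
-- the for-loop over SUB_PAGES with early return; split? is `some` because the separator
-- "/" is nonempty, and the `none` branches of pyGet? are Python's IndexError,
-- unreachable for the fixed SUB_PAGES constant
def validate_page_loop (page : String) (sub_page : String) : List String → Bool
  | [] => false
  | sub_page_looped :: rest =>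
    let parts := (PySem.Str.split? sub_page_looped "/").getD []
    match PySem.List.pyGet? parts 0 with
    | none => false
    | some sub_page_page =>
      if page = sub_page_page then
        match PySem.List.pyGet? parts 1 with
        | none => false
        | some p1 => if sub_page = p1 then true else validate_page_loop page sub_page rest
      else validate_page_loop page sub_page rest

def validate_page (page : String) (sub_page : String) : Bool :=
  if page = "" then true
  else if sub_page ≠ "" then
    validate_page_loop page sub_page SUB_PAGES
  else if PAGES.contains page then true
  else false

-- ===== PORT B =====
-- _build_index(): page -> set of allowed sub_pages ("" stands for "no sub_page");
-- the catch-all match arm is Python's unpacking ValueError, unreachable for the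
-- fixed single-slash SUB_PAGES constant
def buildIndex : PySem.Dict String (PySem.Set String) :=
  let d := PAGES.foldl
    (fun d p => d.insert p (PySem.Set.union (d.getD p PySem.Set.empty) (PySem.Set.ofList [""])))
    PySem.Dict.empty
  SUB_PAGES.foldl
    (fun d entry =>
      match (PySem.Str.split? entry "/").getD [] with
      | [p, s] => d.insert p (PySem.Set.union (d.getD p PySem.Set.empty) (PySem.Set.ofList [s]))
      | _ => d)
    d

def validate_page_alt (page : String) (sub_page : String) : Bool :=
  if page = "" then true
  else PySem.Set.contains (buildIndex.getD page PySem.Set.empty) sub_page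

-- ===== PRECONDITION & SPEC =====
def Spec_validate_page (page : String) (sub_page : String) (out : Bool) : Prop := out = validate_page_alt page sub_page
instance (page : String) (sub_page : String) (out : Bool) : Decidable (Spec_validate_page page sub_page out) := by unfold Spec_validate_page; infer_instance

-- ===== CLAIM (what is proved, stated in full; the proofs are below) =====
def Claim_equal_validate_page : Prop := ∀ (page : String) (sub_page : String), Dom_validate_page page sub_page → Spec_validate_page page sub_page (validate_page page sub_page)

-- ===== LEMMAS AND PROOFS =====

-- the one-time index evaluates to a two-entry literal dictionary
theorem buildIndex_eval :
    buildIndex = PySem.Dict.mk [("single", ["", "create"]), ("recurring", [""])] := by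
  decide

-- A's loop over the single SUB_PAGES entry computes the two-halves comparison
theorem loop_eval (page sub_page : String) :
    validate_page_loop page sub_page SUB_PAGES
      = (decide (page = "single") && decide (sub_page = "create")) := by
  have hsplit : PySem.Str.split? "single/create" "/" = some ["single", "create"] := by decide
  by_cases hp : page = "single" <;> by_cases hs : sub_page = "create" <;>
    simp [SUB_PAGES, validate_page_loop, hsplit, PySem.List.pyGet?, PySem.List.pyIdx?, hp, hs]

-- B's lookup in the literal index, case by page
theorem alt_eval (page sub_page : String) :
    PySem.Set.contains (buildIndex.getD page PySem.Set.empty) sub_page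
      = ((decide (page = "single") && (decide (sub_page = "") || decide (sub_page = "create")))
          || (decide (page = "recurring") && decide (sub_page = ""))) := by
  rw [buildIndex_eval]
  by_cases hp : page = "single"
  · subst hp
    simp [PySem.Dict.getD, PySem.Dict.get?, PySem.Set.contains]
  · by_cases hr : page = "recurring"
    · subst hr
      simp [PySem.Dict.getD, PySem.Dict.get?, PySem.Set.contains, Ne.symm hp]
    · simp [PySem.Dict.getD, PySem.Dict.get?, PySem.Set.contains, PySem.Set.empty,
        Ne.symm hp, Ne.symm hr, hp, hr]

-- ===== VERDICT (by name: the statement is the Claim_ definition above) =====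
theorem validate_page_spec : Claim_equal_validate_page := by
  intro page sub_page _
  unfold Spec_validate_page validate_page validate_page_alt
  rw [alt_eval]
  split_ifs with h1 h2
  · rfl
  · rw [loop_eval]
    by_cases hp : page = "single" <;> simp_all
  · simp_all [PAGES]
  · simp_all [PAGES]
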